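-- pv_equiv track=rewrite | github.com/minjaf/ModernBERT | src/data/compute_MLM_metrics.py | get_mask_positions
-- ===== SOURCE A (Python) =====
-- def get_mask_positions(seq_length, n_tokens_to_mask, offset):
-- 	"""Generate mask positions with given offset.
-- 	For example, if seq_length=10, n_tokens_to_mask=3:
-- 	offset=0: [0,3,6]
-- 	offset=1: [1,4,7]
-- 	offset=2: [2,5,8]
-- 	offset=3: [3,6,9]
-- 	offset=4: [4,7,10]
-- 	"""
-- 	positions = []
-- 	step_size = (seq_length + n_tokens_to_mask - 1) // n_tokens_to_mask
-- 	for i in range(n_tokens_to_mask):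
-- 		pos = offset + i * step_size
-- 		if pos < seq_length:
-- 			positions.append(pos)
-- 	return positions
-- ===== SOURCE B (Python) =====
-- def get_mask_positions(seq_length, n_tokens_to_mask, offset):
--     if n_tokens_to_mask <= 0 or seq_length <= 0:
--         return []
--     step_size = (seq_length + n_tokens_to_mask - 1) // n_tokens_to_mask
--     # number of i >= 0 with offset + i*step_size < seq_length  (ceiling division)
--     in_range = -((offset - seq_length) // step_size)
--     count = min(n_tokens_to_mask, max(0, in_range))
--     return [offset + i * step_size for i in range(count)]
-- ===== Notes on version B (the rewrite author's own statement) =====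
-- stated objective: alternative
-- what changed: Replaces the per-iteration 'if pos < seq_length' loop over all n_tokens_to_mask indices by a closed-form count of in-range positions (ceiling division) and a direct arithmetic-sequence comprehension over only that count.
-- intended difference: On seq_length <= 0 with n_tokens_to_mask >= 1 and offset + (n_tokens_to_mask-1)*step_size < seq_length, A's degenerate step_size <= 0 makes it return a list of repeated or decreasing positions (e.g. [-5, -5]), while B returns [], the intended value since a non-positive-length sequence has no positions to mask. — e.g. on get_mask_positions(0, 2, -5): A returns [-5, -5], B returns []
import Mathlib
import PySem

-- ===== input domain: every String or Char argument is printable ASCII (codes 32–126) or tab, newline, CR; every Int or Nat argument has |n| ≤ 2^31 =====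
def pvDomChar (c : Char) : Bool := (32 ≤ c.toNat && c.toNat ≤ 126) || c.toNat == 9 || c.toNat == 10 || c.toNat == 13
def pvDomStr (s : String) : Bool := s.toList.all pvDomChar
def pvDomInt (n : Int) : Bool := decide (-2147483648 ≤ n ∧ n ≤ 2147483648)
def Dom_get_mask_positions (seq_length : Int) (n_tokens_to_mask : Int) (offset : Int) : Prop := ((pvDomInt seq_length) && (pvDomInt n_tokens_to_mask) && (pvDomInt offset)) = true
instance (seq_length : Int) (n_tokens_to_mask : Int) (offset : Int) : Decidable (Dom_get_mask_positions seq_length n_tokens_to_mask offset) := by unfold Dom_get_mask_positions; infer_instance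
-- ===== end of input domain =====

-- B replaces A's per-iteration bound test by a closed-form count of in-range positions; on
-- seq_length ≤ 0 (degenerate step_size ≤ 0) B returns [] where A returns garbage — see D_ below.

-- ===== PORT A =====
def get_mask_positions (seq_length : Int) (n_tokens_to_mask : Int) (offset : Int) : List Int :=
  let step_size := PySem.Int.floordiv (seq_length + n_tokens_to_mask - 1) n_tokens_to_mask
  (PySem.List.pyRange 0 n_tokens_to_mask 1).foldl
    (fun positions i =>
      let pos := offset + i * step_size
      if pos < seq_length then positions ++ [pos] else positions) []

-- ===== PORT B =====
def get_mask_positions_alt (seq_length : Int) (n_tokens_to_mask : Int) (offset : Int) : List Int :=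
  if n_tokens_to_mask ≤ 0 ∨ seq_length ≤ 0 then []
  else
    let step_size := PySem.Int.floordiv (seq_length + n_tokens_to_mask - 1) n_tokens_to_mask
    let in_range := -(PySem.Int.floordiv (offset - seq_length) step_size)
    let count := min n_tokens_to_mask (max 0 in_range)
    (PySem.List.pyRange 0 count 1).map (fun i => offset + i * step_size)

-- ===== PRECONDITION & SPEC =====
-- Pre_ excludes only n_tokens_to_mask = 0, on which A raises ZeroDivisionError.
def Pre_get_mask_positions (seq_length : Int) (n_tokens_to_mask : Int) (offset : Int) : Prop :=
  n_tokens_to_mask ≠ 0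
instance (seq_length : Int) (n_tokens_to_mask : Int) (offset : Int) : Decidable (Pre_get_mask_positions seq_length n_tokens_to_mask offset) := by unfold Pre_get_mask_positions; infer_instance
def pvWitness_get_mask_positions : Int × Int × Int := (10, 3, 0)

-- On seq_length ≤ 0 with n_tokens_to_mask ≥ 1 and offset + (n_tokens_to_mask-1)*step_size < seq_length,
-- A's degenerate step_size ≤ 0 makes it return repeated or decreasing positions (e.g. [-5, -5]),
-- while B returns [], the intended value since a non-positive-length sequence has no positions to mask.
def D_get_mask_positions (seq_length : Int) (n_tokens_to_mask : Int) (offset : Int) : Prop :=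
  seq_length ≤ 0 ∧ 1 ≤ n_tokens_to_mask ∧
    offset + (n_tokens_to_mask - 1) * (PySem.Int.floordiv (seq_length + n_tokens_to_mask - 1) n_tokens_to_mask) < seq_length
instance (seq_length : Int) (n_tokens_to_mask : Int) (offset : Int) : Decidable (D_get_mask_positions seq_length n_tokens_to_mask offset) := by unfold D_get_mask_positions; infer_instance

def Spec_get_mask_positions (seq_length : Int) (n_tokens_to_mask : Int) (offset : Int) (out : List Int) : Prop := ¬ D_get_mask_positions seq_length n_tokens_to_mask offset → out = get_mask_positions_alt seq_length n_tokens_to_mask offset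
instance (seq_length : Int) (n_tokens_to_mask : Int) (offset : Int) (out : List Int) : Decidable (Spec_get_mask_positions seq_length n_tokens_to_mask offset out) := by unfold Spec_get_mask_positions; infer_instance

def pvDiffWitness_get_mask_positions : Int × Int × Int := (0, 2, -5)
def pvDiffWitnessOut_get_mask_positions : (List Int) × (List Int) := ([-5, -5], [])

-- ===== CLAIM =====
def Claim_unchanged_get_mask_positions : Prop := ∀ (seq_length : Int) (n_tokens_to_mask : Int) (offset : Int), Dom_get_mask_positions seq_length n_tokens_to_mask offset → Pre_get_mask_positions seq_length n_tokens_to_mask offset → Spec_get_mask_positions seq_length n_tokens_to_mask offset (get_mask_positions seq_length n_tokens_to_mask offset)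
def Claim_changed_get_mask_positions : Prop := Dom_get_mask_positions (pvDiffWitness_get_mask_positions.1) (pvDiffWitness_get_mask_positions.2.1) (pvDiffWitness_get_mask_positions.2.2) ∧ Pre_get_mask_positions (pvDiffWitness_get_mask_positions.1) (pvDiffWitness_get_mask_positions.2.1) (pvDiffWitness_get_mask_positions.2.2) ∧ D_get_mask_positions (pvDiffWitness_get_mask_positions.1) (pvDiffWitness_get_mask_positions.2.1) (pvDiffWitness_get_mask_positions.2.2) ∧ get_mask_positions (pvDiffWitness_get_mask_positions.1) (pvDiffWitness_get_mask_positions.2.1) (pvDiffWitness_get_mask_positions.2.2) = pvDiffWitnessOut_get_mask_positions.1 ∧ get_mask_positions_alt (pvDiffWitness_get_mask_positions.1) (pvDiffWitness_get_mask_positions.2.1) (pvDiffWitness_get_mask_positions.2.2) = pvDiffWitnessOut_get_mask_positions.2 ∧ pvDiffWitnessOut_get_mask_positions.1 ≠ pvDiffWitnessOut_get_mask_positions.2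
def Claim_exact_get_mask_positions : Prop := ∀ (seq_length : Int) (n_tokens_to_mask : Int) (offset : Int), Dom_get_mask_positions seq_length n_tokens_to_mask offset → Pre_get_mask_positions seq_length n_tokens_to_mask offset → D_get_mask_positions seq_length n_tokens_to_mask offset → get_mask_positions seq_length n_tokens_to_mask offset ≠ get_mask_positions_alt seq_length n_tokens_to_mask offset

-- ===== LEMMAS AND PROOFS =====

-- A's loop is 'filter then map' over the range.
theorem getA_eq_filter_map (seq_length n_tokens_to_mask offset : Int) :
    get_mask_positions seq_length n_tokens_to_mask offset =
      ((PySem.List.pyRange 0 n_tokens_to_mask 1).filter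
          (fun i => offset + i * (PySem.Int.floordiv (seq_length + n_tokens_to_mask - 1) n_tokens_to_mask) < seq_length)).map
        (fun i => offset + i * (PySem.Int.floordiv (seq_length + n_tokens_to_mask - 1) n_tokens_to_mask)) := by
  unfold get_mask_positions
  have h := PySem.List.foldl_append_if
    (fun i => decide (offset + i * (PySem.Int.floordiv (seq_length + n_tokens_to_mask - 1) n_tokens_to_mask) < seq_length))
    (fun i => offset + i * (PySem.Int.floordiv (seq_length + n_tokens_to_mask - 1) n_tokens_to_mask))
    (PySem.List.pyRange 0 n_tokens_to_mask 1) []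
  simp only [decide_eq_true_eq] at h
  exact h

-- filtering 'i < c' out of an ascending unit range truncates it.
theorem filter_lt_pyRange (k : Nat) : ∀ (a b c : Int), (b - a).toNat = k →
    (PySem.List.pyRange a b 1).filter (fun i => decide (i < c)) = PySem.List.pyRange a (min b c) 1 := by
  induction k with
  | zero =>
    intro a b c h
    rw [PySem.List.pyRange_one_eq_nil (by omega : b ≤ a),
        PySem.List.pyRange_one_eq_nil (by omega : min b c ≤ a)]
    rfl
  | succ k ih =>
    intro a b c h
    have hab : a < b := by omega
    rw [PySem.List.pyRange_one_cons hab, List.filter_cons, ih (a + 1) b c (by omega)]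
    by_cases hc : a < c
    · rw [PySem.List.pyRange_one_cons (by omega : a < min b c)]
      simp [hc]
    · rw [PySem.List.pyRange_one_eq_nil (by omega : min b c ≤ a + 1),
          PySem.List.pyRange_one_eq_nil (by omega : min b c ≤ a)]
      simp [hc]

-- ===== VERDICT =====
theorem step_pos_of_pos {s n : Int} (hn : 1 ≤ n) (hs : 1 ≤ s) :
    1 ≤ PySem.Int.floordiv (s + n - 1) n := by
  by_contra h
  have := (PySem.Int.floordiv_lt_iff_lt_mul (a := s + n - 1) (q := 1) (by omega : (0:Int) < n)).mp (by omega)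
  omega

theorem step_nonpos_of_nonpos {s n : Int} (hn : 1 ≤ n) (hs : s ≤ 0) :
    PySem.Int.floordiv (s + n - 1) n ≤ 0 := by
  have := (PySem.Int.floordiv_lt_iff_lt_mul (a := s + n - 1) (q := 1) (by omega : (0:Int) < n)).mpr (by omega)
  omega

theorem get_mask_positions_spec : Claim_unchanged_get_mask_positions := by
  intro s n o _ hpre hnD
  rw [getA_eq_filter_map]
  set step := PySem.Int.floordiv (s + n - 1) n with hstepdef
  by_cases hn : n ≤ 0
  · rw [PySem.List.pyRange_one_eq_nil hn]
    simp [get_mask_positions_alt, hn]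
  · have hn1 : 1 ≤ n := by omega
    by_cases hs : s ≤ 0
    · -- degenerate: step ≤ 0, and ¬D gives s ≤ o + (n-1)*step, so no position qualifies
      have hstep : step ≤ 0 := step_nonpos_of_nonpos hn1 hs
      have hge : s ≤ o + (n - 1) * step := by
        unfold D_get_mask_positions at hnD
        push Not at hnD
        exact hnD hs hn1
      have hfil : (PySem.List.pyRange 0 n 1).filter (fun i => o + i * step < s) = [] := by
        rw [List.filter_eq_nil_iff]
        intro i hi
        have hmem := PySem.List.mem_pyRange_one.mp hi
        have : (n - 1) * step ≤ i * step :=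
          mul_le_mul_of_nonpos_right (by omega : i ≤ n - 1) hstep
        simp only [decide_eq_true_eq]
        omega
      rw [hfil]
      simp [get_mask_positions_alt, hs]
    · -- regular: step ≥ 1, closed-form count
      have hs1 : 1 ≤ s := by omega
      have hstep : 1 ≤ step := step_pos_of_pos hn1 hs1
      set c : Int := -(PySem.Int.floordiv (o - s) step) with hcdef
      have hbr : (c - 1) * step < s - o ∧ s - o ≤ c * step := by
        have := (PySem.Int.neg_floordiv_neg_eq_iff_of_pos (a := s - o) (b := step) (q := c)
          (by omega : (0:Int) < step)).mp
        apply this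
        rw [hcdef]
        congr 1
        congr 1
        omega
      have hequiv : ∀ i : Int, (o + i * step < s) ↔ (i < c) := by
        intro i
        constructor
        · intro h
          by_contra hic
          have : c * step ≤ i * step :=
            mul_le_mul_of_nonneg_right (by omega : c ≤ i) (by omega : (0:Int) ≤ step)
          omega
        · intro h
          have : i * step ≤ (c - 1) * step :=
            mul_le_mul_of_nonneg_right (by omega : i ≤ c - 1) (by omega : (0:Int) ≤ step)
          omega
      have hfun : (fun (i : Int) => decide (o + i * step < s)) = (fun i => decide (i < c)) := by
        funext i; exact decide_eq_decide.mpr (hequiv i)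
      have hfil : (PySem.List.pyRange 0 n 1).filter (fun i => o + i * step < s) =
          PySem.List.pyRange 0 (min n c) 1 := by
        rw [hfun, filter_lt_pyRange (n - 0).toNat 0 n c rfl]
      rw [hfil]
      unfold get_mask_positions_alt
      rw [if_neg (by omega)]
      simp only [← hstepdef, ← hcdef]
      by_cases hc0 : 0 ≤ c
      · rw [max_eq_right hc0]
      · rw [PySem.List.pyRange_one_eq_nil (by omega : min n c ≤ 0),
            PySem.List.pyRange_one_eq_nil (by omega : min n (max 0 c) ≤ 0)]
theorem get_mask_positions_changed : Claim_changed_get_mask_positions := by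
  unfold Claim_changed_get_mask_positions; decide
theorem get_mask_positions_tight : Claim_exact_get_mask_positions := by
  intro s n o _ hpre hD
  obtain ⟨hs, hn, hlt⟩ := hD
  set step := PySem.Int.floordiv (s + n - 1) n with hstepdef
  have halt : get_mask_positions_alt s n o = [] := by
    simp [get_mask_positions_alt, hs]
  rw [halt, getA_eq_filter_map, ← hstepdef]
  intro hnil
  have hmem : (n - 1) ∈ (PySem.List.pyRange 0 n 1).filter (fun i => o + i * step < s) := by
    rw [List.mem_filter]
    exact ⟨PySem.List.mem_pyRange_one.mpr (by omega), by simpa using hlt⟩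
  have : o + (n - 1) * step ∈
      ((PySem.List.pyRange 0 n 1).filter (fun i => o + i * step < s)).map
        (fun i => o + i * step) := List.mem_map_of_mem hmem
  rw [hnil] at this
  exact (List.not_mem_nil).elim this
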